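-- pv_equiv track=rewrite | github.com/hjcdg1/algorithm-hw2 | hw2.py | check
-- ===== SOURCE A (Python) =====
-- def check(opt_seq, val_seq, out_seq):
--     ans_seq = []
--     check_val = 0
--     for opt, val, out in zip(opt_seq, val_seq, out_seq):
--         if opt == 0:
--             if val in ans_seq:
--                 check_val = 0
--             else:
--                 ans_seq.append(val)
--                 check_val = val
--         elif opt == 1:
--             if val in ans_seq:
--                 ans_seq.remove(val)
--                 check_val = val
--             else:
--                 check_val = 0
--         elif opt == 2:
--             ans_seq.sort()
--             if (val <= len(ans_seq)):
--                 check_val = ans_seq[val-1]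
--             else:
--                 check_val = 0
--         else:
--             ans_seq.sort()
--             if val in ans_seq:
--                 for v, i in zip(ans_seq, range(len(ans_seq))):
--                     if v == val:
--                         check_val = i + 1
--             else:
--                 check_val = 0
--         if (check_val != out):
--             return False
--     return True
-- ===== SOURCE B (Python) =====
-- def _bisect_left(s, x):
--     # first index i with s[i] >= x, on the sorted list s (hand-written binary search)
--     lo, hi = 0, len(s)
--     while lo < hi:
--         mid = (lo + hi) // 2
--         if s[mid] < x:
--             lo = mid + 1
--         else:
--             hi = mid
--     return lo
--
--
-- def check(opt_seq, val_seq, out_seq):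
--     s = []  # the current set, kept as a strictly increasing list at all times
--     for opt, val, out in zip(opt_seq, val_seq, out_seq):
--         i = _bisect_left(s, val)
--         present = i < len(s) and s[i] == val
--         if opt == 0:
--             if present:
--                 res = 0
--             else:
--                 s = s[:i] + [val] + s[i:]
--                 res = val
--         elif opt == 1:
--             if present:
--                 s = s[:i] + s[i + 1:]
--                 res = val
--             else:
--                 res = 0
--         elif opt == 2:
--             if 1 <= val <= len(s):
--                 res = s[val - 1]
--             else:
--                 res = 0
--         else:
--             res = i + 1 if present else 0
--         if res != out:
--             return False
--     return True
-- ===== Notes on version B (the rewrite author's own statement) =====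
-- stated objective: alternative
-- what changed: B keeps the set as a permanently sorted list and locates membership, insert position, rank and k-th element with one hand-written binary search per operation, instead of A's unsorted list with linear 'in' scans, list.remove, a full sort before every query and a linear rank loop; list splicing keeps per-op cost comparable, so no speed is claimed.
-- outside the precondition, e.g. on check([0, 2], [5, 0], [5, 5]): A returns True, B returns False
import Mathlib
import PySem

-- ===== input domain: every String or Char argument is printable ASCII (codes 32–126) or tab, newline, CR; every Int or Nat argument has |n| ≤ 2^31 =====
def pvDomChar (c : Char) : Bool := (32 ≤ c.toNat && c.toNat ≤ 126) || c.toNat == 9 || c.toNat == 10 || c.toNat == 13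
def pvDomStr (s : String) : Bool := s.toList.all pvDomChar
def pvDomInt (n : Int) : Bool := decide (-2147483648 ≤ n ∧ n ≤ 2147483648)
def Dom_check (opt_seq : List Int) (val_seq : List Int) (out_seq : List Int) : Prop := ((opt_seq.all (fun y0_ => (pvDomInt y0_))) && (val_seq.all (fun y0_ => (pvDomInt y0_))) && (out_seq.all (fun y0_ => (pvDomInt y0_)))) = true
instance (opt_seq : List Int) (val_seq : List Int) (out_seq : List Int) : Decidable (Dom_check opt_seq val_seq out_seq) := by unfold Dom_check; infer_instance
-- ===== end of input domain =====

-- B replaces A's unsorted list (linear scans + a sort before every query) by a permanently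
-- sorted list driven by one hand-written binary search per operation (objective: alternative).

-- ===== PORT A =====
-- Loop body of A: state = (ans_seq, check_val); early `return False` = result false.
-- Python `ans_seq[val-1]` raises IndexError for val ≤ 0 (or wraps for small negatives); Pre_check
-- restricts opt-2 steps to val ≥ 1, where the index is in range, so `.getD 0` is never exercised.
def checkGo : List (Int × Int × Int) → List Int → Int → Bool
  | [], _, _ => true
  | (opt, val, out) :: rest, ans, cv =>
    let st :=
      if opt == 0 then
        if ans.contains val then (ans, (0 : Int))
        else (ans ++ [val], val)
      else if opt == 1 then
        if ans.contains val then ((PySem.List.remove? ans val).getD ans, val)  -- val ∈ ans, so remove? = some _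
        else (ans, 0)
      else if opt == 2 then
        let sa := PySem.List.sorted ans (fun x => x) false
        if val ≤ (sa.length : Int) then (sa, (PySem.List.pyGet? sa (val - 1)).getD 0)
        else (sa, 0)
      else
        let sa := PySem.List.sorted ans (fun x => x) false
        if sa.contains val then
          (sa, (sa.zip (PySem.List.pyRange 0 (sa.length : Int) 1)).foldl
                 (fun acc vi => if vi.1 == val then vi.2 + 1 else acc) cv)
        else (sa, 0)
    if st.2 != out then false else checkGo rest st.1 st.2

def check (opt_seq : List Int) (val_seq : List Int) (out_seq : List Int) : Bool :=
  checkGo (opt_seq.zip (val_seq.zip out_seq)) [] 0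

-- ===== PORT B =====
-- _bisect_left from Source B (hand-written binary search); Python's s[mid] is always in range here.
def blGo (s : List Int) (x : Int) (lo hi : Nat) : Nat :=
  if h : lo < hi then
    let mid := (lo + hi) / 2
    if s.getD mid 0 < x then blGo s x (mid + 1) hi else blGo s x lo mid
  else lo
  termination_by hi - lo
  decreasing_by all_goals omega

-- Loop body of B: state = the sorted list s.
def checkAltGo : List (Int × Int × Int) → List Int → Bool
  | [], _ => true
  | (opt, val, out) :: rest, s =>
    let i := blGo s val 0 s.length
    let present := decide (i < s.length) && (s.getD i 0 == val)   -- s[i] in range under the guard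
    let st :=
      if opt == 0 then
        if present then (s, (0 : Int))
        else (s.take i ++ [val] ++ s.drop i, val)
      else if opt == 1 then
        if present then (s.take i ++ s.drop (i + 1), val)
        else (s, 0)
      else if opt == 2 then
        (s, if 1 ≤ val ∧ val ≤ (s.length : Int) then (PySem.List.pyGet? s (val - 1)).getD 0 else 0)
      else
        (s, if present then (i : Int) + 1 else 0)
    if st.2 != out then false else checkAltGo rest st.1

def check_alt (opt_seq : List Int) (val_seq : List Int) (out_seq : List Int) : Bool :=
  checkAltGo (opt_seq.zip (val_seq.zip out_seq)) []

-- ===== PRECONDITION & SPEC =====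
-- Pre_check excludes sequences containing a select step (opt = 2) with a non-positive rank val:
-- there Python A indexes ans_seq[val-1] with val-1 < 0, which raises IndexError or, for small
-- negatives, returns an element via Python's accidental negative-index wraparound.
def Pre_check (opt_seq : List Int) (val_seq : List Int) (out_seq : List Int) : Prop :=
  ∀ t ∈ opt_seq.zip (val_seq.zip out_seq), t.1 = 2 → 1 ≤ t.2.1
instance (opt_seq : List Int) (val_seq : List Int) (out_seq : List Int) : Decidable (Pre_check opt_seq val_seq out_seq) := by unfold Pre_check; infer_instance

def pvWitness_check : List Int × List Int × List Int := ([0, 2, 3, 1], [4, 1, 4, 4], [4, 4, 1, 4])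

def Spec_check (opt_seq : List Int) (val_seq : List Int) (out_seq : List Int) (out : Bool) : Prop := out = check_alt opt_seq val_seq out_seq
instance (opt_seq : List Int) (val_seq : List Int) (out_seq : List Int) (out : Bool) : Decidable (Spec_check opt_seq val_seq out_seq out) := by unfold Spec_check; infer_instance

-- ===== CLAIM (what is proved, stated in full; the proofs are below) =====
def Claim_equal_check : Prop := ∀ (opt_seq : List Int) (val_seq : List Int) (out_seq : List Int), Dom_check opt_seq val_seq out_seq → Pre_check opt_seq val_seq out_seq → Spec_check opt_seq val_seq out_seq (check opt_seq val_seq out_seq)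

-- ===== LEMMAS AND PROOFS =====

-- countP (· < x) splits a ≤-sorted list into a strict prefix of elements < x and a suffix of elements ≥ x.
theorem sorted_split (x : Int) (s : List Int) (hs : s.Pairwise (· ≤ ·)) :
    (∀ a ∈ s.take (s.countP (fun y => decide (y < x))), a < x) ∧
    (∀ b ∈ s.drop (s.countP (fun y => decide (y < x))), ¬ b < x) := by
  induction s with
  | nil => simp
  | cons a t ih =>
    rcases List.pairwise_cons.mp hs with ⟨hat, ht⟩
    rcases ih ht with ⟨ih1, ih2⟩
    by_cases hax : a < x
    · constructor
      · intro y hy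
        simp [hax] at hy
        rcases hy with rfl | hy
        · exact hax
        · exact ih1 _ hy
      · intro y hy
        simp [hax] at hy
        exact ih2 _ hy
    · have hz : t.countP (fun y => decide (y < x)) = 0 := by
        rw [List.countP_eq_zero]
        intro y hy
        simp only [decide_eq_true_eq]
        exact fun hlt => hax (lt_of_le_of_lt (hat y hy) hlt)
      constructor
      · intro y hy
        simp [hax, hz] at hy
      · intro y hy
        simp [hax, hz] at hy
        rcases hy with rfl | hy
        · exact hax
        · exact fun hlt => hax (lt_of_le_of_lt (hat y hy) hlt)

theorem getD_lt_iff (x : Int) (s : List Int) (hs : s.Pairwise (· ≤ ·)) (i : Nat) (hi : i < s.length) :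
    (s.getD i 0 < x ↔ i < s.countP (fun y => decide (y < x))) := by
  rcases sorted_split x s hs with ⟨h1, h2⟩
  have hc := List.countP_le_length (l := s) (p := fun y => decide (y < x))
  rw [List.getD_eq_getElem s 0 hi]
  constructor
  · intro hlt
    by_contra hge
    refine h2 s[i] ?_ hlt
    have hm : s[i] = (s.drop (s.countP (fun y => decide (y < x))))[i - s.countP (fun y => decide (y < x))]'(by simp; omega) := by
      rw [List.getElem_drop]
      congr 1
      omega
    rw [hm]
    exact List.getElem_mem _
  · intro hlt
    have hm : s[i] = (s.take (s.countP (fun y => decide (y < x))))[i]'(by simp; omega) := by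
      rw [List.getElem_take]
    exact h1 _ (hm ▸ List.getElem_mem _)

theorem blGo_eq (s : List Int) (x : Int) (hs : s.Pairwise (· ≤ ·)) :
    ∀ n lo hi, hi - lo ≤ n → lo ≤ s.countP (fun y => decide (y < x)) →
      s.countP (fun y => decide (y < x)) ≤ hi → hi ≤ s.length →
      blGo s x lo hi = s.countP (fun y => decide (y < x)) := by
  intro n
  induction n with
  | zero =>
    intro lo hi h1 h2 h3 h4
    rw [blGo, dif_neg (by omega : ¬ lo < hi)]
    omega
  | succ n ih =>
    intro lo hi h1 h2 h3 h4
    by_cases hlh : lo < hi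
    · rw [blGo, dif_pos hlh]
      have hmid : (lo + hi) / 2 < s.length := by omega
      by_cases hm : s.getD ((lo + hi) / 2) 0 < x
      · have := (getD_lt_iff x s hs _ hmid).mp hm
        simp only [hm, if_true]
        exact ih _ _ (by omega) (by omega) h3 h4
      · have hcm : ¬ (lo + hi) / 2 < s.countP (fun y => decide (y < x)) :=
          fun h => hm ((getD_lt_iff x s hs _ hmid).mpr h)
        simp only [hm, if_false]
        exact ih _ _ (by omega) h2 (by omega) (by omega)
    · rw [blGo, dif_neg hlh]
      omega

theorem bl_spec (s : List Int) (x : Int) (hs : s.Pairwise (· ≤ ·)) :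
    blGo s x 0 s.length = s.countP (fun y => decide (y < x)) := by
  exact blGo_eq s x hs s.length 0 s.length (by omega) (Nat.zero_le _)
    (List.countP_le_length) (le_refl _)

-- `present` at i = countP (· < val) is exactly membership of val in the sorted list.
theorem present_iff (val : Int) (s : List Int) (hs : s.Pairwise (· ≤ ·)) :
    (s.countP (fun y => decide (y < val)) < s.length ∧
      s.getD (s.countP (fun y => decide (y < val))) 0 = val) ↔ val ∈ s := by
  set c := s.countP (fun y => decide (y < val)) with hc
  constructor
  · rintro ⟨h1, h2⟩
    rw [← h2, List.getD_eq_getElem s 0 h1]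
    exact List.getElem_mem _
  · intro hmem
    rcases List.getElem_of_mem hmem with ⟨j, hj, hjv⟩
    have hjc : ¬ j < c := by
      intro hlt
      have := (getD_lt_iff val s hs j hj).mpr (hc ▸ hlt)
      rw [List.getD_eq_getElem s 0 hj, hjv] at this
      exact lt_irrefl _ this
    have h1 : c < s.length := by omega
    have hnotlt : ¬ s.getD c 0 < val := fun h => by
      have := (getD_lt_iff val s hs c h1).mp h
      omega
    have hle : s.getD c 0 ≤ val := by
      rw [List.getD_eq_getElem s 0 h1, ← hjv]
      rcases Nat.lt_or_ge c j with h | h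
      · exact List.pairwise_iff_getElem.mp hs c j h1 hj h
      · have hj' : j = c := by omega
        subst hj'
        exact le_refl _
    exact ⟨h1, le_antisymm hle (not_lt.mp hnotlt)⟩

-- the rank fold: with a unique match at index c, the fold returns offset + c + 1 whatever the init.
theorem fold_no_match (val : Int) (t : List Int) (l : List Int) (acc : Int)
    (h : ∀ y ∈ t, y ≠ val) :
    (t.zip l).foldl (fun acc vi => if vi.1 == val then vi.2 + 1 else acc) acc = acc := by
  induction t generalizing l acc with
  | nil => simp
  | cons y t ih =>
    cases l with
    | nil => simp
    | cons a l =>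
      simp only [List.zip_cons_cons, List.foldl_cons]
      have hy : (y == val) = false := by simp [h y (List.mem_cons_self)]
      simp only [hy, Bool.false_eq_true, if_false]
      exact ih l acc (fun z hz => h z (List.mem_cons_of_mem _ hz))

theorem fold_rank (val : Int) :
    ∀ (s : List Int) (a : Int) (c : Nat) (cv : Int),
      (∀ j (hj : j < s.length), s[j] = val ↔ j = c) → c < s.length →
      (s.zip (PySem.List.pyRange a (a + (s.length : Int)) 1)).foldl
        (fun acc vi => if vi.1 == val then vi.2 + 1 else acc) cv = a + (c : Int) + 1 := by
  intro s
  induction s with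
  | nil => intro a c cv _ hc; simp at hc
  | cons x t ih =>
    intro a c cv hu hc
    have hlen : a + ((x :: t).length : Int) = (a + 1) + (t.length : Int) := by
      simp only [List.length_cons]; push_cast; ring
    rw [hlen, PySem.List.pyRange_one_cons (by omega)]
    simp only [List.zip_cons_cons, List.foldl_cons]
    by_cases hc0 : c = 0
    · subst hc0
      have hx : x = val := (hu 0 (by simp)).mpr rfl
      have hnone : ∀ y ∈ t, y ≠ val := by
        intro y hy
        rcases List.getElem_of_mem hy with ⟨j, hj, rfl⟩
        intro hv
        have := (hu (j + 1) (by simp; omega)).mp (by simpa using hv)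
        omega
      simp only [hx, beq_self_eq_true, if_true]
      rw [fold_no_match val t _ _ hnone]
      simp
    · rcases Nat.exists_eq_succ_of_ne_zero hc0 with ⟨k, rfl⟩
      have hx : (x == val) = false := by
        simp only [beq_eq_false_iff_ne, ne_eq]
        intro hv
        have := (hu 0 (by simp)).mp (by simpa using hv)
        omega
      simp only [hx, Bool.false_eq_true, if_false]
      have := ih (a + 1) k cv (fun j hj => by
        have := hu (j + 1) (by simp; omega)
        simpa using this) (by simpa using Nat.lt_of_succ_lt_succ hc)
      rw [this]
      push_cast
      ring

-- erasing the sorted list s at position countP (· < val) is List.erase, and stays sorted.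
theorem sorted_erase_eq (val : Int) (s : List Int) (hs : s.Pairwise (· ≤ ·))
    (h1 : s.countP (fun y => decide (y < val)) < s.length)
    (h2 : s.getD (s.countP (fun y => decide (y < val))) 0 = val) :
    s.erase val = s.take (s.countP (fun y => decide (y < val)))
      ++ s.drop (s.countP (fun y => decide (y < val)) + 1) := by
  set c := s.countP (fun y => decide (y < val)) with hc
  have hsplit := sorted_split val s hs
  have hdrop : s.drop c = val :: s.drop (c + 1) := by
    rw [List.drop_eq_getElem_cons h1]
    rw [List.getD_eq_getElem s 0 h1] at h2
    rw [h2]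
  have hnot : val ∉ s.take c := fun hmem => lt_irrefl val (hsplit.1 val hmem)
  conv_lhs => rw [← List.take_append_drop c s, hdrop]
  rw [List.erase_append_right _ hnot, List.erase_cons_head]

-- the spliced insert is sorted when val is absent.
theorem sorted_insert (val : Int) (s : List Int) (hs : s.Pairwise (· < ·)) (hv : val ∉ s) :
    (s.take (s.countP (fun y => decide (y < val))) ++ [val]
      ++ s.drop (s.countP (fun y => decide (y < val)))).Pairwise (· < ·) := by
  set c := s.countP (fun y => decide (y < val)) with hc
  have hsle : s.Pairwise (· ≤ ·) := hs.imp le_of_lt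
  have hsplit := sorted_split val s hsle
  have hcross : ∀ a ∈ s.take c, ∀ b ∈ s.drop c, a < b := by
    have := (List.pairwise_append (l₁ := s.take c) (l₂ := s.drop c)).mp
      (by rw [List.take_append_drop]; exact hs)
    exact this.2.2
  rw [List.append_assoc, List.pairwise_append]
  refine ⟨hs.sublist (List.take_sublist _ _), ?_, ?_⟩
  · rw [List.singleton_append, List.pairwise_cons]
    refine ⟨?_, hs.sublist (List.drop_sublist _ _)⟩
    intro b hb
    have hne : b ≠ val := fun h => hv (h ▸ List.mem_of_mem_drop hb)
    have := hsplit.2 b hb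
    omega
  · intro a ha b hb
    rw [List.singleton_append, List.mem_cons] at hb
    rcases hb with rfl | hb
    · exact hsplit.1 a ha
    · exact hcross a ha b hb

-- the main induction: A's state ans and B's state s stay permutations, s strictly sorted.
theorem go_eq (l : List (Int × Int × Int)) :
    ∀ (ans s : List Int) (cv : Int), s.Perm ans → s.Pairwise (· < ·) →
      (∀ t ∈ l, t.1 = 2 → 1 ≤ t.2.1) →
      checkGo l ans cv = checkAltGo l s := by
  induction l with
  | nil => intro ans s cv _ _ _; rfl
  | cons head rest ih =>
    obtain ⟨opt, val, out⟩ := head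
    intro ans s cv hperm hsort hpre
    have hsle : s.Pairwise (· ≤ ·) := hsort.imp le_of_lt
    have hprerest : ∀ t ∈ rest, t.1 = 2 → 1 ≤ t.2.1 :=
      fun t ht => hpre t (List.mem_cons_of_mem _ ht)
    have hsa : PySem.List.sorted ans (fun x => x) false = s :=
      PySem.List.sorted_eq_of_perm_of_pairwise_lt ans s (fun x => x) hperm hsort
    simp only [checkGo, checkAltGo, bl_spec s val hsle]
    set c := s.countP (fun y => decide (y < val)) with hc
    by_cases h0 : opt = 0
    · -- insert
      by_cases hv : val ∈ s
      · obtain ⟨hlt, hgd⟩ := (present_iff val s hsle).mpr hv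
        have hpb : (decide (c < s.length) && (s.getD c 0 == val)) = true := by
          simp only [Bool.and_eq_true, decide_eq_true_eq, beq_iff_eq]
          exact ⟨hc ▸ hlt, hc ▸ hgd⟩
        have hca : ans.contains val = true := by
          simpa using hperm.mem_iff.mp hv
        simp only [h0, hpb, hca, beq_self_eq_true, if_true]
        split
        · rfl
        · exact ih ans s 0 hperm hsort hprerest
      · have hpb : (decide (c < s.length) && (s.getD c 0 == val)) = false := by
          by_contra hb
          rw [Bool.not_eq_false, Bool.and_eq_true, decide_eq_true_eq, beq_iff_eq] at hb
          exact hv ((present_iff val s hsle).mp (hc ▸ hb))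
        have hca : ans.contains val = false := by
          simpa using fun h => hv (hperm.mem_iff.mpr h)
        simp only [h0, hpb, hca, Bool.false_eq_true, if_false, beq_self_eq_true, if_true]
        split
        · rfl
        · refine ih (ans ++ [val]) (s.take c ++ [val] ++ s.drop c) val ?_
            (hc ▸ sorted_insert val s hsort hv) hprerest
          have h1p : (s.take c ++ [val] ++ s.drop c).Perm (val :: s) := by
            rw [List.append_assoc, List.singleton_append]
            have h := List.perm_middle (a := val) (l₁ := s.take c) (l₂ := s.drop c)
            rwa [List.take_append_drop] at h
          have h2p : (val :: ans).Perm (ans ++ [val]) :=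
            (List.perm_append_singleton val ans).symm
          exact (h1p.trans (hperm.cons val)).trans h2p
    · by_cases h1 : opt = 1
      · -- remove
        have hb0 : (opt == 0) = false := by simp [h0]
        have hbeq1 : (opt == 1) = true := by simp [h1]
        by_cases hv : val ∈ s
        · obtain ⟨hlt, hgd⟩ := (present_iff val s hsle).mpr hv
          have hpb : (decide (c < s.length) && (s.getD c 0 == val)) = true := by
            simp only [Bool.and_eq_true, decide_eq_true_eq, beq_iff_eq]
            exact ⟨hc ▸ hlt, hc ▸ hgd⟩
          have hca : ans.contains val = true := by
            simpa using hperm.mem_iff.mp hv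
          have herase : PySem.List.remove? ans val = some (ans.erase val) :=
            PySem.List.remove?_eq_some_erase ans val (hperm.mem_iff.mp hv)
          have heq : s.take c ++ s.drop (c + 1) = s.erase val :=
            hc ▸ (sorted_erase_eq val s hsle hlt hgd).symm
          simp only [hb0, Bool.false_eq_true, if_false, hbeq1, if_true,
            hpb, hca, herase, Option.getD_some]
          split
          · rfl
          · refine ih (ans.erase val) (s.take c ++ s.drop (c + 1)) val ?_ ?_ hprerest
            · rw [heq]; exact hperm.erase val
            · refine hsort.sublist ?_
              have hdd : s.drop (c + 1) = (s.drop c).drop 1 := by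
                simp [List.drop_drop]
              rw [hdd]
              conv_rhs => rw [← List.take_append_drop c s]
              exact (List.drop_sublist 1 _).append_left _
        · have hpb : (decide (c < s.length) && (s.getD c 0 == val)) = false := by
            by_contra hb
            rw [Bool.not_eq_false, Bool.and_eq_true, decide_eq_true_eq, beq_iff_eq] at hb
            exact hv ((present_iff val s hsle).mp (hc ▸ hb))
          have hca : ans.contains val = false := by
            simpa using fun h => hv (hperm.mem_iff.mpr h)
          simp only [hb0, Bool.false_eq_true, if_false, hbeq1, if_true, hpb, hca]
          split
          · rfl
          · exact ih ans s 0 hperm hsort hprerest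
      · by_cases h2 : opt = 2
        · -- select k-th
          have hval1 : 1 ≤ val := hpre (opt, val, out) List.mem_cons_self (by simpa using h2)
          have hb0 : (opt == 0) = false := by simp [h0]
          have hb1 : (opt == 1) = false := by simp [h1]
          have hbeq2 : (opt == 2) = true := by simp [h2]
          simp only [hb0, hb1, Bool.false_eq_true, if_false, hbeq2, if_true, hsa]
          by_cases hle : val ≤ (s.length : Int)
          · have hcond : (1 ≤ val ∧ val ≤ (s.length : Int)) := ⟨hval1, hle⟩
            rw [if_pos hle, if_pos hcond]
            simp only []
            split
            · rfl
            · exact ih s s _ (List.Perm.refl s) hsort hprerest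
          · have hcond : ¬ (1 ≤ val ∧ val ≤ (s.length : Int)) := fun h => hle h.2
            rw [if_neg hle, if_neg hcond]
            simp only []
            split
            · rfl
            · exact ih s s 0 (List.Perm.refl s) hsort hprerest
        · -- rank
          have hb0 : (opt == 0) = false := by simp [h0]
          have hb1 : (opt == 1) = false := by simp [h1]
          have hb2 : (opt == 2) = false := by simp [h2]
          by_cases hv : val ∈ s
          · obtain ⟨hlt, hgd⟩ := (present_iff val s hsle).mpr hv
            have hpb : (decide (c < s.length) && (s.getD c 0 == val)) = true := by
              simp only [Bool.and_eq_true, decide_eq_true_eq, beq_iff_eq]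
              exact ⟨hc ▸ hlt, hc ▸ hgd⟩
            have hscont : s.contains val = true := by simpa using hv
            have hcs : s[c]'(hc ▸ hlt) = val := by
              rw [← List.getD_eq_getElem s 0 (hc ▸ hlt)]; exact hc ▸ hgd
            have hu : ∀ j (hj : j < s.length), s[j] = val ↔ j = c := by
              intro j hj
              constructor
              · intro hjv
                by_contra hne
                rcases Nat.lt_or_ge j c with h | h
                · have := List.pairwise_iff_getElem.mp hsort j c hj (hc ▸ hlt) h
                  rw [hjv, hcs] at this
                  exact lt_irrefl _ this
                · have hcj : c < j := by omega
                  have := List.pairwise_iff_getElem.mp hsort c j (hc ▸ hlt) hj hcj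
                  rw [hjv, hcs] at this
                  exact lt_irrefl _ this
              · intro h; subst h; exact hcs
            have hfold := fold_rank val s 0 c cv hu (hc ▸ hlt)
            simp only [zero_add] at hfold
            simp only [hb0, hb1, hb2, Bool.false_eq_true, if_false, hsa, hscont, hpb, if_true]
            rw [hfold]
            split
            · rfl
            · exact ih s s _ (List.Perm.refl s) hsort hprerest
          · have hpb : (decide (c < s.length) && (s.getD c 0 == val)) = false := by
              by_contra hb
              rw [Bool.not_eq_false, Bool.and_eq_true, decide_eq_true_eq, beq_iff_eq] at hb
              exact hv ((present_iff val s hsle).mp (hc ▸ hb))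
            have hscont : s.contains val = false := by simpa using hv
            simp only [hb0, hb1, hb2, Bool.false_eq_true, if_false, hsa, hscont, hpb]
            split
            · rfl
            · exact ih s s 0 (List.Perm.refl s) hsort hprerest

-- ===== VERDICT (by name: the statement is the Claim_ definition above) =====
theorem check_spec : Claim_equal_check := by
  intro opt_seq val_seq out_seq _ hpre
  unfold Spec_check check check_alt
  exact go_eq _ [] [] 0 (List.Perm.refl _) (by simp) hpre
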